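-- pv_equiv track=rewrite | github.com/KyleKing/vcr-tui | src/vcr_tui/ui/yaml_viewer.py | _parse_key_path
-- ===== SOURCE A (Python) =====
-- def _parse_key_path(key: str) -> list[str]:
--     """Parse a key path into its component parts.
--
--     Args:
--         key: Key path (e.g., "user.name" or "items[0].id")
--
--     Returns:
--         List of path components (e.g., ["user", "name"] or ["items", "[0]", "id"])
--     """
--     # Simple parsing - split by dots, keep brackets as separate parts
--     parts: list[str] = []
--     current_part = ""
--
--     for char in key:
--         if char == ".":
--             if current_part:
--                 parts.append(current_part)
--                 current_part = ""
--         elif char == "[":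
--             if current_part:
--                 parts.append(current_part)
--                 current_part = ""
--             current_part = "["
--         elif char == "]":
--             current_part += "]"
--             parts.append(current_part)
--             current_part = ""
--         else:
--             current_part += char
--
--     if current_part:
--         parts.append(current_part)
--
--     return parts
-- ===== SOURCE B (Python) =====
-- def _parse_key_path(key: str) -> list[str]:
--     """Parse a key path into its component parts (idiomatic rewrite).
--
--     Insert a '.' boundary before every '[' and after every ']', then split
--     on dots and drop the empty pieces.
--     """
--     return [p for p in key.replace("[", ".[").replace("]", "].").split(".") if p]
-- ===== Notes on version B (the rewrite author's own statement) =====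
-- stated objective: idiomatic
-- what changed: Replaces the explicit character loop with buffer/flush state by two str.replace calls that insert dot boundaries around brackets followed by a single split on dots with empty pieces dropped; the work moves into C-level str methods.
import Mathlib
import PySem

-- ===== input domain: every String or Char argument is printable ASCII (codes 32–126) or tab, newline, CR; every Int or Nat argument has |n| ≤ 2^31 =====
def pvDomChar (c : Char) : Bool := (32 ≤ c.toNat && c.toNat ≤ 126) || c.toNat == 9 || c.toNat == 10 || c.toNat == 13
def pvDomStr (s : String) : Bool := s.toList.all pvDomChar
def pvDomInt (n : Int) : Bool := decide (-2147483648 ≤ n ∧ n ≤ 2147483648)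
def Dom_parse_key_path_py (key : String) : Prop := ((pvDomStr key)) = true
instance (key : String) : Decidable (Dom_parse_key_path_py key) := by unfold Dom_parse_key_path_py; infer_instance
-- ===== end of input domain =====

-- B replaces A's char loop with replace-then-split ('.' inserted around brackets); objective: idiomatic.


-- ===== PORT A =====
-- A's loop: one step per character over state (parts, current_part)
def pvStepA (st : List (List Char) × List Char) (c : Char) : List (List Char) × List Char :=
  if c = '.' then
    (if st.2 ≠ [] then (st.1 ++ [st.2], []) else st)
  else if c = '[' then
    (if st.2 ≠ [] then (st.1 ++ [st.2], ['[']) else (st.1, ['[']))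
  else if c = ']' then
    (st.1 ++ [st.2 ++ [']']], [])
  else
    (st.1, st.2 ++ [c])

def parse_key_path_py (key : String) : List String :=
  let st := key.toList.foldl pvStepA ([], [])
  (if st.2 ≠ [] then st.1 ++ [st.2] else st.1).map String.ofList

-- ===== PORT B =====
def parse_key_path_py_alt (key : String) : List String :=
  ((PySem.Chars.splitOn
      (PySem.Chars.replace (PySem.Chars.replace key.toList ['['] ['.', '[']) [']'] [']', '.'])
      ['.']).filter (fun p => p ≠ [])).map String.ofList

-- ===== PRECONDITION & SPEC =====
def Spec_parse_key_path_py (key : String) (out : List String) : Prop := out = parse_key_path_py_alt key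
instance (key : String) (out : List String) : Decidable (Spec_parse_key_path_py key out) := by unfold Spec_parse_key_path_py; infer_instance

-- ===== CLAIM (what is proved, stated in full; the proofs are below) =====
def Claim_equal_parse_key_path_py : Prop := ∀ (key : String), Dom_parse_key_path_py key → Spec_parse_key_path_py key (parse_key_path_py key)

-- ===== LEMMAS AND PROOFS =====

-- single-character substitution (what str.replace does when old is one char)
def pvSub (x : Char) (new : List Char) (l : List Char) : List Char :=
  l.flatMap (fun c => if c = x then new else [c])

-- split on a single character, standard recursive form
def pvSpl (x : Char) : List Char → List (List Char)
  | [] => [[]]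
  | c :: t => if c = x then [] :: pvSpl x t else
      match pvSpl x t with
      | [] => [[c]]
      | h :: r => (c :: h) :: r

def pvMapFirst (f : List Char → List Char) : List (List Char) → List (List Char)
  | [] => []
  | h :: t => f h :: t

@[simp] lemma pvMapFirst_nil (f : List Char → List Char) : pvMapFirst f [] = [] := rfl
@[simp] lemma pvMapFirst_cons (f : List Char → List Char) (h : List Char) (t : List (List Char)) :
    pvMapFirst f (h :: t) = f h :: t := rfl

@[simp] lemma pvMapFirst_id (l : List (List Char)) : pvMapFirst (fun x => x) l = l := by
  cases l <;> rfl

lemma pvSpl_ne_nil (x : Char) (l : List Char) : pvSpl x l ≠ [] := by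
  induction l with
  | nil => simp [pvSpl]
  | cons c t ih =>
    simp only [pvSpl]
    split
    · simp
    · cases h : pvSpl x t <;> simp

lemma replace_go_single (x : Char) (new : List Char) :
    ∀ (fuel : Nat) (l acc : List Char), l.length ≤ fuel →
      PySem.Chars.replace.go [x] new fuel l acc = acc.reverse ++ pvSub x new l := by
  intro fuel
  induction fuel with
  | zero => intro l acc h; cases l with
      | nil => simp [PySem.Chars.replace.go, pvSub]
      | cons c t => simp at h
  | succ n ih =>
    intro l acc h
    cases l with
    | nil => simp [PySem.Chars.replace.go, pvSub]
    | cons c t =>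
      simp only [PySem.Chars.replace.go]
      by_cases hc : c = x
      · have hp : [x].isPrefixOf (c :: t) = true := by
          simp [List.isPrefixOf, hc]
        rw [if_pos hp]
        have : List.drop [x].length (c :: t) = t := by simp
        rw [this, ih t (new.reverse ++ acc) (by simpa using Nat.le_of_succ_le_succ h)]
        simp [pvSub, hc]
      · have hp : [x].isPrefixOf (c :: t) = false := by
          simp [List.isPrefixOf]
          exact fun hxc => absurd hxc.symm hc
        rw [if_neg (by simp [hp])]
        rw [ih t (c :: acc) (by simpa using Nat.le_of_succ_le_succ h)]
        simp [pvSub, hc]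

lemma replace_single (x : Char) (new l : List Char) :
    PySem.Chars.replace l [x] new = pvSub x new l := by
  simp only [PySem.Chars.replace, List.isEmpty]
  have := replace_go_single x new l.length l [] (le_refl _)
  simpa using this

lemma splitOn_go_single (x : Char) :
    ∀ (fuel : Nat) (l cur : List Char) (acc : List (List Char)), l.length ≤ fuel →
      PySem.Chars.splitOn.go [x] fuel l cur acc =
        acc.reverse ++ pvMapFirst (cur.reverse ++ ·) (pvSpl x l) := by
  intro fuel
  induction fuel with
  | zero => intro l cur acc h; cases l with
      | nil => simp [PySem.Chars.splitOn.go, pvSpl, pvMapFirst]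
      | cons c t => simp at h
  | succ n ih =>
    intro l cur acc h
    cases l with
    | nil => simp [PySem.Chars.splitOn.go, pvSpl, pvMapFirst]
    | cons c t =>
      simp only [PySem.Chars.splitOn.go]
      by_cases hc : c = x
      · have hp : [x].isPrefixOf (c :: t) = true := by simp [List.isPrefixOf, hc]
        rw [if_pos hp]
        have hd : List.drop [x].length (c :: t) = t := by simp
        rw [hd, ih t [] (cur.reverse :: acc) (by simpa using Nat.le_of_succ_le_succ h)]
        cases hs : pvSpl x t with
        | nil => exact absurd hs (pvSpl_ne_nil x t)
        | cons h0 r => simp [pvSpl, hc, hs, pvMapFirst]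
      · have hp : [x].isPrefixOf (c :: t) = false := by
          simp [List.isPrefixOf]
          exact fun hxc => absurd hxc.symm hc
        rw [if_neg (by simp [hp])]
        rw [ih t (c :: cur) acc (by simpa using Nat.le_of_succ_le_succ h)]
        cases hs : pvSpl x t with
        | nil => exact absurd hs (pvSpl_ne_nil x t)
        | cons h0 r => simp [pvSpl, hc, hs, pvMapFirst]

lemma splitOn_single (x : Char) (l : List Char) :
    PySem.Chars.splitOn l [x] = pvSpl x l := by
  simp only [PySem.Chars.splitOn]
  rw [splitOn_go_single x (l.length + 1) l [] [] (Nat.le_succ _)]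
  cases hs : pvSpl x l with
  | nil => exact absurd hs (pvSpl_ne_nil x l)
  | cons h0 r => simp [pvMapFirst]

-- the two single-char replaces compose into one per-character expansion
def pvG (l : List Char) : List Char :=
  l.flatMap (fun c => if c = '[' then ['.', '['] else if c = ']' then [']', '.'] else [c])

lemma sub_sub_eq_pvG (l : List Char) :
    pvSub ']' [']', '.'] (pvSub '[' ['.', '['] l) = pvG l := by
  induction l with
  | nil => rfl
  | cons c t ih =>
    unfold pvSub pvG at ih ⊢
    simp only [List.flatMap_cons, List.flatMap_append, ih]
    by_cases h1 : c = '[' <;> by_cases h2 : c = ']' <;>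
      simp [h1, h2, List.flatMap_cons]

lemma pvG_cons (c : Char) (t : List Char) :
    pvG (c :: t) = (if c = '[' then ['.', '['] else if c = ']' then [']', '.'] else [c]) ++ pvG t := by
  simp [pvG]

-- the main loop invariant: A's fold, finished off, equals B's split-filter pipeline
lemma main_inv (s : List Char) : ∀ (parts : List (List Char)) (cur : List Char),
    (let st := s.foldl pvStepA (parts, cur)
     if st.2 ≠ [] then st.1 ++ [st.2] else st.1) =
    parts ++ (pvMapFirst (cur ++ ·) (pvSpl '.' (pvG s))).filter (fun p => p ≠ []) := by
  induction s with
  | nil =>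
    intro parts cur
    by_cases h : cur = [] <;> simp [pvSpl, pvG, pvMapFirst, h]
  | cons c t ih =>
    intro parts cur
    cases hs : pvSpl '.' (pvG t) with
    | nil => exact absurd hs (pvSpl_ne_nil _ _)
    | cons h0 r =>
      by_cases h1 : c = '.'
      · by_cases h : cur = []
        · have := ih parts []
          rw [hs] at this
          simp only [pvMapFirst_cons, List.nil_append] at this
          rw [pvG_cons]
          simp [pvStepA, pvSpl, h1, h, hs, this]
        · have := ih (parts ++ [cur]) []
          rw [hs] at this
          simp only [pvMapFirst_cons, List.nil_append] at this
          rw [pvG_cons]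
          simp [pvStepA, pvSpl, h1, h, hs, this]
      · by_cases h2 : c = '['
        · by_cases h : cur = []
          · have := ih parts ['[']
            rw [hs] at this
            simp only [pvMapFirst_cons] at this
            rw [pvG_cons]
            simp [pvStepA, pvSpl, h2, h, hs, this]
          · have := ih (parts ++ [cur]) ['[']
            rw [hs] at this
            simp only [pvMapFirst_cons] at this
            rw [pvG_cons]
            simp [pvStepA, pvSpl, h2, h, hs, this]
        · by_cases h3 : c = ']'
          · have := ih (parts ++ [cur ++ [']']]) []
            rw [hs] at this
            simp only [pvMapFirst_cons, List.nil_append] at this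
            rw [pvG_cons]
            simp [pvStepA, pvSpl, h3, hs, this]
          · have := ih parts (cur ++ [c])
            rw [hs] at this
            simp only [pvMapFirst_cons] at this
            rw [pvG_cons]
            simp [pvStepA, pvSpl, h1, h2, h3, hs, this]

-- ===== VERDICT (by name: the statement is the Claim_ definition above) =====
theorem parse_key_path_py_spec : Claim_equal_parse_key_path_py := by
  intro key _
  unfold Spec_parse_key_path_py parse_key_path_py parse_key_path_py_alt
  rw [replace_single, replace_single, sub_sub_eq_pvG, splitOn_single]
  have := main_inv key.toList [] []
  cases hs : pvSpl '.' (pvG key.toList) with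
  | nil => exact absurd hs (pvSpl_ne_nil _ _)
  | cons h0 r =>
    rw [hs] at this
    simp only [pvMapFirst_cons, List.nil_append] at this
    exact congrArg (List.map String.ofList) this
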